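-- pv_equiv track=rewrite | github.com/raaafff/raf | hw1/Task_4.py | bananas
-- ===== SOURCE A (Python) =====
-- import itertools
--
-- def bananas(s) -> set:
--     res = set()
--     for comb in itertools.combinations(range(len(s)), len(s) - len('banana')):
--         sep = list(s)
--         for i in comb:
--             sep[i] = '-'
--         med_res = ''.join(sep)
--         if med_res.replace('-', '') == 'banana':
--             res.add(med_res)
--     return res
-- ===== SOURCE B (Python) =====
-- def bananas(s) -> set:
--     # Recursively enumerate only the actual subsequence matches of 'banana',
--     # building the masked string along the way, instead of trying all C(n, n-6)
--     # dash placements.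
--     target = 'banana'
--
--     def go(i, k):
--         # masked tails of s[i:] in which target[k:] is matched and every
--         # non-matched position is '-'
--         if k == len(target):
--             return ['-' * (len(s) - i)]
--         if len(s) - i < len(target) - k:
--             return []
--         res = ['-' + r for r in go(i + 1, k)]
--         if s[i] == target[k]:
--             res += [s[i] + r for r in go(i + 1, k + 1)]
--         return res
--
--     return set(go(0, 0))
-- ===== Notes on version B (the rewrite author's own statement) =====
-- stated objective: faster
-- what changed: Instead of enumerating all C(n, n-6) dash-position combinations and testing each masked string, B recursively walks the string once per match, extending only prefixes that still form a valid subsequence match of the target word, so it visits only viable branches.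
-- outside the precondition, e.g. on bananas('ban'): A raises ValueError, B returns set()
-- crash fix: On strings shorter than 6 characters A raises ValueError (itertools.combinations gets a negative r); B returns the empty set. — e.g. on bananas("ban"): A raises ValueError, B returns []
import Mathlib
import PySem

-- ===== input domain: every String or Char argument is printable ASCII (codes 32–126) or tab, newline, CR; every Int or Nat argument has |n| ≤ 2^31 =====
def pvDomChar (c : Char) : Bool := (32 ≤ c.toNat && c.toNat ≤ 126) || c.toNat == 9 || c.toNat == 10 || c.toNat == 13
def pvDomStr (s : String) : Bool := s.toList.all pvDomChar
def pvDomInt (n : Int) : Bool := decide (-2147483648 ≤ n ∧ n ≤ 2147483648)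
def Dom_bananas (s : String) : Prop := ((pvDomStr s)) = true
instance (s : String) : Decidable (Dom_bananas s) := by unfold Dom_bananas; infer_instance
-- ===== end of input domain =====

-- B enumerates only the actual subsequence matches of 'banana' recursively instead of
-- trying every C(n, n-6) dash placement; equivalence is about the returned set
-- (modelled as its insertion-order list, which coincides for both programs).

-- ===== PORT A =====
-- itertools.combinations(xs, r), ported as the standard lexicographic recursion
-- (exact: same tuples in the same order as itertools.combinations)
def pvCombinations : List Nat → Nat → List (List Nat)
  | _, 0 => [[]]
  | [], _ + 1 => []
  | x :: xs, r + 1 => ((pvCombinations xs r).map (fun c => x :: c)) ++ pvCombinations xs (r + 1)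

def bananas (s : String) : List String :=
  -- res = set(); for comb in combinations(range(len(s)), len(s)-6): …
  (pvCombinations (List.range s.toList.length) (s.toList.length - 6)).foldl
    (fun res comb =>
      -- sep = list(s); for i in comb: sep[i] = '-'   (indices from range(len(s)), always in range)
      let sep := comb.foldl (fun sep i => sep.set i '-') s.toList
      -- med_res = ''.join(sep)   (join of single-char strings = String.ofList)
      let med_res := String.ofList sep
      if PySem.Str.replace med_res "-" "" = "banana" then PySem.Set.add res med_res else res)
    ([] : PySem.Set String)

-- ===== PORT B =====
-- go(i, k) over the suffixes: first argument s[i:], second argument target[k:]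
def pvGo : List Char → List Char → List (List Char)
  | cs, [] => [List.replicate cs.length '-']
  | [], _ :: _ => []              -- the prune 'len(s)-i < len(target)-k' with s[i:] empty
  | c :: cs, t :: ts =>
    if (c :: cs).length < (t :: ts).length then []
    else ((pvGo cs (t :: ts)).map (fun r => '-' :: r)) ++
         (if c = t then (pvGo cs ts).map (fun r => c :: r) else [])

def bananas_alt (s : String) : List String :=
  PySem.Set.ofList ((pvGo s.toList ("banana".toList)).map String.ofList)

-- ===== PRECONDITION & SPEC =====
-- Pre_ excludes strings shorter than 6 characters, on which A raises ValueError
-- (itertools.combinations gets a negative r).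
def Pre_bananas (s : String) : Prop := 6 ≤ s.toList.length
instance (s : String) : Decidable (Pre_bananas s) := by unfold Pre_bananas; infer_instance
def pvWitness_bananas : String := ("xbanana")

-- On strings shorter than 6 characters A raises ValueError; B returns the empty set.
def Raises_bananas (s : String) : Prop := s.toList.length < 6
instance (s : String) : Decidable (Raises_bananas s) := by unfold Raises_bananas; infer_instance
def pvRaiseWitness_bananas : String := ("ban")
def pvRaiseWitnessOut_bananas : List String := []

def Spec_bananas (s : String) (out : List String) : Prop := out = bananas_alt s
instance (s : String) (out : List String) : Decidable (Spec_bananas s out) := by unfold Spec_bananas; infer_instance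

-- ===== CLAIM (what is proved, stated in full; the proofs are below) =====
def Claim_equal_bananas : Prop := ∀ (s : String), Dom_bananas s → Pre_bananas s → Spec_bananas s (bananas s)
def Claim_raises_bananas : Prop := (∀ (s : String), Dom_bananas s → Raises_bananas s → ¬ Pre_bananas s) ∧ (Dom_bananas (pvRaiseWitness_bananas) ∧ Raises_bananas (pvRaiseWitness_bananas) ∧ bananas_alt (pvRaiseWitness_bananas) = pvRaiseWitnessOut_bananas)

-- ===== LEMMAS AND PROOFS =====

-- the target, with no '-' in it
def pvTarget : List Char := ['b', 'a', 'n', 'a', 'n', 'a']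

-- spec-level intermediate: all maskings of cs with exactly r dashes, in A's (lex) order
def pvMaskAll : List Char → Nat → List (List Char)
  | cs, 0 => [cs]
  | [], _ + 1 => []
  | c :: cs, r + 1 =>
    ((pvMaskAll cs r).map (fun m => '-' :: m)) ++ ((pvMaskAll cs (r + 1)).map (fun m => c :: m))

-- the dash-removal predicate A tests, on char lists
def pvKeep : List Char → Bool := fun m => m.filter (fun c => c != '-') == pvTarget

lemma pvFilter_dash (m : List Char) :
    ('-' :: m).filter (fun c => c != '-') = m.filter (fun c => c != '-') := by simp

lemma pvFilter_ne {c : Char} (h : c ≠ '-') (m : List Char) :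
    (c :: m).filter (fun c => c != '-') = c :: m.filter (fun c => c != '-') := by simp [h]

lemma pvFilter_singleton (p : List Char → Bool) (a : List Char) :
    List.filter p [a] = if p a then [a] else [] := by
  rw [List.filter_cons]; split <;> simp_all

lemma pvCombinations_map (f : Nat → Nat) :
    ∀ (xs : List Nat) (r : Nat),
      pvCombinations (xs.map f) r = (pvCombinations xs r).map (List.map f) := by
  intro xs
  induction xs with
  | nil => intro r; cases r <;> simp [pvCombinations]
  | cons x xs ih =>
    intro r
    cases r with
    | zero => simp [pvCombinations]
    | succ r => simp [pvCombinations, ih r, ih (r + 1), Function.comp]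

lemma pvMask_shift (c : Char) :
    ∀ (comb : List Nat) (cs : List Char),
      (comb.map Nat.succ).foldl (fun sep i => sep.set i '-') (c :: cs)
        = c :: comb.foldl (fun sep i => sep.set i '-') cs := by
  intro comb
  induction comb with
  | nil => intro cs; simp
  | cons i rest ih => intro cs; simp [List.foldl_cons, ih]

lemma pvMask_range :
    ∀ (cs : List Char) (r : Nat),
      (pvCombinations (List.range cs.length) r).map
          (fun comb => comb.foldl (fun sep i => sep.set i '-') cs)
        = pvMaskAll cs r := by
  intro cs
  induction cs with
  | nil => intro r; cases r <;> simp [pvCombinations, pvMaskAll]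
  | cons c cs ih =>
    intro r
    cases r with
    | zero => simp [pvCombinations, pvMaskAll]
    | succ r =>
      have hrange : List.range (c :: cs).length = 0 :: (List.range cs.length).map Nat.succ := by
        simp [List.range_succ_eq_map]
      rw [hrange]
      rw [show pvCombinations (0 :: (List.range cs.length).map Nat.succ) (r + 1)
            = ((pvCombinations ((List.range cs.length).map Nat.succ) r).map (fun cb => 0 :: cb))
              ++ pvCombinations ((List.range cs.length).map Nat.succ) (r + 1) from rfl]
      rw [pvCombinations_map, pvCombinations_map]
      simp only [List.map_append, List.map_map]
      rw [show pvMaskAll (c :: cs) (r + 1)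
            = ((pvMaskAll cs r).map (fun m => '-' :: m)) ++ ((pvMaskAll cs (r + 1)).map (fun m => c :: m)) from rfl]
      rw [← ih r, ← ih (r + 1)]
      simp only [List.map_map]
      congr 1
      · apply List.map_congr_left
        intro comb _
        simp [Function.comp, pvMask_shift]
      · apply List.map_congr_left
        intro comb _
        simp [Function.comp, pvMask_shift]

lemma pvMaskAll_gt : ∀ (cs : List Char) (r : Nat), cs.length < r → pvMaskAll cs r = [] := by
  intro cs
  induction cs with
  | nil =>
    intro r h
    cases r with
    | zero => omega
    | succ r => rfl
  | cons c cs ih =>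
    intro r h
    cases r with
    | zero => simp at h
    | succ r =>
      show ((pvMaskAll cs r).map _) ++ ((pvMaskAll cs (r + 1)).map _) = []
      rw [ih r (by simp at h; omega), ih (r + 1) (by simp at h; omega)]
      rfl

lemma pvMaskAll_full : ∀ (cs : List Char), pvMaskAll cs cs.length = [List.replicate cs.length '-'] := by
  intro cs
  induction cs with
  | nil => rfl
  | cons c cs ih =>
    show ((pvMaskAll cs cs.length).map _) ++ ((pvMaskAll cs (cs.length + 1)).map _) = _
    rw [ih, pvMaskAll_gt cs (cs.length + 1) (by omega)]
    simp [List.replicate_succ]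

lemma pvMaskAll_dashes :
    ∀ (cs : List Char) (r : Nat) (m : List Char), m ∈ pvMaskAll cs r →
      (m.filter (fun c => c != '-')).length + r ≤ cs.length := by
  intro cs
  induction cs with
  | nil =>
    intro r m hm
    cases r with
    | zero =>
      rw [show pvMaskAll [] 0 = [[]] from rfl, List.mem_singleton] at hm
      subst hm; simp
    | succ r => exact absurd hm (by rw [show pvMaskAll [] (r + 1) = [] from rfl]; simp)
  | cons c cs ih =>
    intro r m hm
    cases r with
    | zero =>
      rw [show pvMaskAll (c :: cs) 0 = [c :: cs] from rfl, List.mem_singleton] at hm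
      subst hm
      have := List.length_filter_le (fun c => c != '-') (c :: cs)
      omega
    | succ r =>
      rw [show pvMaskAll (c :: cs) (r + 1)
            = ((pvMaskAll cs r).map (fun m => '-' :: m)) ++ ((pvMaskAll cs (r + 1)).map (fun m => c :: m)) from rfl,
          List.mem_append] at hm
      rcases hm with hm | hm
      · rcases List.mem_map.1 hm with ⟨m', hm', rfl⟩
        have := ih r m' hm'
        rw [pvFilter_dash]
        simp only [List.length_cons]
        omega
      · rcases List.mem_map.1 hm with ⟨m', hm', rfl⟩
        have := ih (r + 1) m' hm'
        by_cases hc : c = '-'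
        · subst hc
          rw [pvFilter_dash]
          simp only [List.length_cons]
          omega
        · rw [pvFilter_ne hc]
          simp only [List.length_cons]
          omega

lemma pvGo_prune : ∀ (cs t : List Char), cs.length < t.length → pvGo cs t = [] := by
  intro cs t h
  cases t with
  | nil => simp at h
  | cons t ts =>
    cases cs with
    | nil => rfl
    | cons c cs => simp only [pvGo]; rw [if_pos (by simpa using h)]

-- the filter predicate, for a general target t
def pvKeepT (t : List Char) : List Char → Bool := fun m => m.filter (fun c => c != '-') == t

lemma pvMain :
    ∀ (cs t : List Char), '-' ∉ t → t.length ≤ cs.length →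
      (pvMaskAll cs (cs.length - t.length)).filter (pvKeepT t) = pvGo cs t := by
  intro cs
  induction cs with
  | nil =>
    intro t _ hlen
    have ht : t = [] := List.length_eq_zero_iff.1 (Nat.le_zero.mp (by simpa using hlen))
    subst ht
    show List.filter (pvKeepT []) [[]] = [[]]
    rw [pvFilter_singleton]
    simp [pvKeepT]
  | cons c cs ih =>
    intro t hd hlen
    cases t with
    | nil =>
      simp only [List.length_nil, Nat.sub_zero]
      rw [pvMaskAll_full]
      rw [pvFilter_singleton]
      have : pvKeepT [] (List.replicate (c :: cs).length '-') = true := by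
        simp [pvKeepT]
      rw [if_pos this]
      rfl
    | cons t0 ts =>
      have ht0 : t0 ≠ '-' := fun h => hd (h ▸ List.mem_cons_self ..)
      have hts : '-' ∉ ts := fun h => hd (List.mem_cons_of_mem _ h)
      have hklen : ts.length ≤ cs.length := by
        simp only [List.length_cons] at hlen; omega
      have hgo : pvGo (c :: cs) (t0 :: ts)
          = ((pvGo cs (t0 :: ts)).map (fun r => '-' :: r)) ++
            (if c = t0 then (pvGo cs ts).map (fun r => c :: r) else []) := by
        simp only [pvGo]
        rw [if_neg (by simp only [List.length_cons, Nat.not_lt]; omega)]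
      rcases Nat.eq_or_lt_of_le hklen with heq | hlt
      · -- cs.length = ts.length : no dash remains to place
        have hr : (c :: cs).length - (t0 :: ts).length = 0 := by
          simp only [List.length_cons]; omega
        rw [hr, hgo, pvGo_prune cs (t0 :: ts) (by simp only [List.length_cons]; omega)]
        simp only [List.map_nil, List.nil_append]
        rw [show pvMaskAll (c :: cs) 0 = [c :: cs] from rfl, pvFilter_singleton]
        by_cases hc : c = t0
        · subst hc
          have hr' : cs.length - ts.length = 0 := by omega
          rw [if_pos rfl, ← ih ts hts hklen, hr']
          rw [show pvMaskAll cs 0 = [cs] by cases cs <;> rfl, pvFilter_singleton]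
          have hcond : pvKeepT (c :: ts) (c :: cs) = pvKeepT ts cs := by
            simp only [pvKeepT, pvFilter_ne ht0]
            by_cases hrest : cs.filter (fun c => c != '-') = ts
            · simp [hrest]
            · rw [beq_eq_false_iff_ne.2 hrest, beq_eq_false_iff_ne.2 (fun h => hrest (by simp only [List.cons.injEq, true_and] at h; exact h))]
          rw [hcond]
          by_cases hk : pvKeepT ts cs = true
          · rw [if_pos hk, if_pos hk]; rfl
          · rw [if_neg hk, if_neg hk]; rfl
        · rw [if_neg hc]
          have hcond : pvKeepT (t0 :: ts) (c :: cs) = false := by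
            unfold pvKeepT
            by_cases hcd : c = '-'
            · subst hcd
              rw [pvFilter_dash]
              apply beq_eq_false_iff_ne.2
              intro hcontra
              have h1 := List.length_filter_le (fun c => c != '-') cs
              have h2 := congrArg List.length hcontra
              simp only [List.length_cons] at h2
              omega
            · rw [pvFilter_ne hcd]
              exact beq_eq_false_iff_ne.2 (fun h => hc (by simp only [List.cons.injEq] at h; exact h.1))
          rw [hcond]
          simp
      · -- ts.length < cs.length : at least one dash remains
        have hr : (c :: cs).length - (t0 :: ts).length = (cs.length - (t0 :: ts).length) + 1 := by
          simp only [List.length_cons]; omega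
        rw [hr, hgo]
        rw [show pvMaskAll (c :: cs) ((cs.length - (t0 :: ts).length) + 1)
              = ((pvMaskAll cs (cs.length - (t0 :: ts).length)).map (fun m => '-' :: m))
                ++ ((pvMaskAll cs ((cs.length - (t0 :: ts).length) + 1)).map (fun m => c :: m)) from rfl]
        rw [List.filter_append, List.filter_map, List.filter_map]
        congr 1
        · -- skip branch
          rw [← ih (t0 :: ts) hd (by simp only [List.length_cons]; omega)]
          have hfc : (pvMaskAll cs (cs.length - (t0 :: ts).length)).filter
                ((pvKeepT (t0 :: ts)) ∘ (fun m => '-' :: m))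
              = (pvMaskAll cs (cs.length - (t0 :: ts).length)).filter (pvKeepT (t0 :: ts)) :=
            List.filter_congr (fun m _ => by
              simp only [Function.comp_apply, pvKeepT, pvFilter_dash])
          rw [hfc]
        · -- take branch
          have hr2 : (cs.length - (t0 :: ts).length) + 1 = cs.length - ts.length := by
            simp only [List.length_cons]; omega
          rw [hr2]
          by_cases hc : c = t0
          · subst hc
            rw [if_pos rfl, ← ih ts hts (by omega)]
            congr 1
            apply List.filter_congr
            intro m _
            simp only [Function.comp_apply, pvKeepT, pvFilter_ne ht0]
            by_cases hrest : m.filter (fun c => c != '-') = ts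
            · simp [hrest]
            · rw [beq_eq_false_iff_ne.2 hrest, beq_eq_false_iff_ne.2 (fun h => hrest (by simp only [List.cons.injEq, true_and] at h; exact h))]
          · rw [if_neg hc]
            have hnil : (pvMaskAll cs (cs.length - ts.length)).filter
                ((pvKeepT (t0 :: ts)) ∘ (fun m => c :: m)) = [] := by
              rw [List.filter_eq_nil_iff]
              intro m hm
              simp only [Function.comp_apply, pvKeepT]
              rw [Bool.not_eq_true]
              by_cases hcd : c = '-'
              · subst hcd
                rw [pvFilter_dash]
                apply beq_eq_false_iff_ne.2
                intro hcontra
                have h1 := pvMaskAll_dashes cs (cs.length - ts.length) m hm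
                have h2 := congrArg List.length hcontra
                simp only [List.length_cons] at h2
                omega
              · rw [pvFilter_ne hcd]
                exact beq_eq_false_iff_ne.2 (fun h => hc (by simp only [List.cons.injEq] at h; exact h.1))
            rw [hnil, List.map_nil]

-- the general loop shape of A: conditional set-insertion in a fold
lemma pvFoldl_add_if {α : Type} (l : List α) (g : α → String) (P : α → Prop) [DecidablePred P]
    (s : PySem.Set String) :
    l.foldl (fun res x => if P x then PySem.Set.add res (g x) else res) s
      = PySem.Set.update s ((l.filter (fun x => decide (P x))).map g) := by
  induction l generalizing s with
  | nil => simp [PySem.Set.update]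
  | cons x xs ih =>
    rw [List.foldl_cons, List.filter_cons]
    by_cases hp : P x
    · rw [if_pos hp, ih, if_pos (by simp [hp]), List.map_cons, PySem.Set.update_cons]
    · rw [if_neg hp, ih, if_neg (by simp [hp])]

lemma pvReplace_go_dash :
    ∀ (l acc : List Char) (fuel : Nat), l.length ≤ fuel →
      PySem.Chars.replace.go ['-'] [] fuel l acc = acc.reverse ++ l.filter (fun c => c != '-') := by
  intro l
  induction l with
  | nil =>
    intro acc fuel _
    cases fuel <;> simp [PySem.Chars.replace.go]
  | cons c t ih =>
    intro acc fuel hf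
    cases fuel with
    | zero => simp at hf
    | succ fuel =>
      rw [show PySem.Chars.replace.go ['-'] [] (fuel + 1) (c :: t) acc
            = if (['-'] : List Char).isPrefixOf (c :: t)
              then PySem.Chars.replace.go ['-'] [] fuel (List.drop (['-'] : List Char).length (c :: t)) (([] : List Char).reverse ++ acc)
              else PySem.Chars.replace.go ['-'] [] fuel t (c :: acc) from rfl]
      by_cases hc : c = '-'
      · subst hc
        rw [if_pos (by simp [List.isPrefixOf])]
        simp only [List.length_cons, List.length_nil, List.drop_succ_cons, List.drop_zero,
          List.reverse_nil, List.nil_append]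
        rw [ih acc fuel (by simpa using hf)]
        rw [pvFilter_dash]
      · rw [if_neg (by simp [List.isPrefixOf]; exact fun h => hc h.symm)]
        rw [ih (c :: acc) fuel (by simp only [List.length_cons] at hf; omega)]
        rw [pvFilter_ne hc]
        simp

lemma pvReplace_dash (m : List Char) :
    PySem.Chars.replace m ['-'] [] = m.filter (fun c => c != '-') := by
  rw [show PySem.Chars.replace m ['-'] [] =
        if (['-'] : List Char).isEmpty then ([] : List Char) ++ m.flatMap (fun c => c :: [])
        else PySem.Chars.replace.go ['-'] [] m.length m [] from rfl]
  rw [if_neg (by simp)]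
  rw [pvReplace_go_dash m [] m.length (le_refl _)]
  simp

lemma pvCond_eq (m : List Char) :
    (decide (PySem.Str.replace (String.ofList m) "-" "" = "banana")) = pvKeepT pvTarget m := by
  have h1 : (PySem.Str.replace (String.ofList m) "-" "" = "banana")
      ↔ (m.filter (fun c => c != '-') = pvTarget) := by
    rw [← String.toList_inj, PySem.Str.toList_replace]
    have hs : (String.ofList m).toList = m := by simp
    have ho : ("-" : String).toList = ['-'] := by decide
    have he : ("" : String).toList = [] := by decide
    have hb : ("banana" : String).toList = pvTarget := by decide
    rw [hs, ho, he, hb, pvReplace_dash]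
  unfold pvKeepT
  rw [Bool.eq_iff_iff]
  simp [h1]

theorem pvBananas_eq (s : String) (hp : 6 ≤ s.toList.length) :
    bananas s = bananas_alt s := by
  show (pvCombinations (List.range s.toList.length) (s.toList.length - 6)).foldl
      (fun res comb =>
        if PySem.Str.replace (String.ofList (comb.foldl (fun sep i => sep.set i '-') s.toList)) "-" "" = "banana"
        then PySem.Set.add res (String.ofList (comb.foldl (fun sep i => sep.set i '-') s.toList)) else res)
      ([] : PySem.Set String)
    = bananas_alt s
  refine Eq.trans (pvFoldl_add_if (pvCombinations (List.range s.toList.length) (s.toList.length - 6))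
      (fun comb => String.ofList (comb.foldl (fun sep i => sep.set i '-') s.toList))
      (fun comb => PySem.Str.replace (String.ofList (comb.foldl (fun sep i => sep.set i '-') s.toList)) "-" "" = "banana")
      []) ?_
  rw [PySem.Set.update_nil_left]
  unfold bananas_alt
  congr 1
  rw [List.filter_congr (fun comb _ => pvCond_eq (comb.foldl (fun sep i => sep.set i '-') s.toList))]
  show List.map (String.ofList ∘ (fun comb => comb.foldl (fun sep i => sep.set i '-') s.toList))
      (List.filter ((pvKeepT pvTarget) ∘ (fun comb => comb.foldl (fun sep i => sep.set i '-') s.toList))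
        (pvCombinations (List.range s.toList.length) (s.toList.length - 6)))
    = List.map String.ofList (pvGo s.toList ("banana".toList))
  rw [← List.map_map, ← List.filter_map, pvMask_range s.toList (s.toList.length - 6)]
  have hb : ("banana" : String).toList = pvTarget := by decide
  rw [hb]
  rw [show s.toList.length - 6 = s.toList.length - pvTarget.length from rfl]
  rw [pvMain s.toList pvTarget (by decide) (by simpa using hp)]

-- ===== VERDICT (by name: the statement is the Claim_ definition above) =====
theorem bananas_spec : Claim_equal_bananas := by
  intro s _ hpre
  unfold Spec_bananas
  exact pvBananas_eq s hpre

@[simp]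
theorem bananas_raises : Claim_raises_bananas := by
  unfold Claim_raises_bananas
  constructor
  · intro s _ hr hp
    unfold Raises_bananas at hr
    unfold Pre_bananas at hp
    omega
  · exact ⟨by decide, by decide, by decide⟩
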